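-- pv_equiv track=rewrite | github.com/stbrumme/leetcode | 2049.py | countHighestScoreNodes
-- ===== SOURCE A (Python) =====
-- from typing import List
--
-- def countHighestScoreNodes(parents: List[int]) -> int:
--     size = len(parents)
--
--     # children of each node
--     children = [ list() for _ in range(size) ]
--     for i, p in enumerate(parents):
--         if p > -1:
--             children[p].append(i)
--
--     # calculate subtree size where "node" is the root
--     cache = [ -1 ] * size # a simple cache that is both faster and less memory hungry than @cache
--     def subtree(node):
--         if cache[node] == -1:
--             cache[node] = 1 + sum(subtree(c) for c in children[node])
--         return cache[node]
--
--     best = 0 # highscore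
--     same = 0 # nodes with same highscore
--     for node in range(size):
--         # subtrees of children
--         one = two = 0
--         if len(children[node]) >= 1:
--             one = subtree(children[node][0])
--         if len(children[node]) == 2:
--             two = subtree(children[node][1])
--
--         # anything else, skip the current node, too
--         above = size - (1 + one + two)
--
--         # never multiply with zero
--         score  = max(above, 1)
--         score *= max(one, 1)
--         score *= max(two, 1)
--
--         # update counter
--         if  best < score:
--             best = score
--             same = 0
--         if  best == score:
--             same += 1
--
--     return same
-- ===== SOURCE B (Python) =====
-- from typing import List
--
-- def countHighestScoreNodes(parents: List[int]) -> int: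
--     size = len(parents)
--
--     # children of each node
--     children = [ list() for _ in range(size) ]
--     for i, p in enumerate(parents):
--         if p > -1:
--             children[p].append(i)
--
--     # depth of each node = number of ancestors (walk the parent chain)
--     depth = [0] * size
--     for i in range(size):
--         d = 0
--         j = parents[i]
--         while j > -1:
--             d += 1
--             j = parents[j]
--         depth[i] = d
--
--     # one accumulation pass in order of decreasing depth: every node is
--     # processed before its parent, so sizes[node] is complete when pushed up
--     sizes = [1] * size
--     for node in sorted(range(size), key=lambda i: depth[i], reverse=True):
--         p = parents[node]
--         if p > -1:
--             sizes[p] += sizes[node]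
--
--     best = 0
--     same = 0
--     for node in range(size):
--         ch = children[node]
--         one = sizes[ch[0]] if len(ch) >= 1 else 0
--         two = sizes[ch[1]] if len(ch) == 2 else 0
--         above = size - (1 + one + two)
--         score = max(above, 1) * max(one, 1) * max(two, 1)
--         if best < score:
--             best = score
--             same = 0
--         if best == score:
--             same += 1
--     return same
-- ===== Notes on version B (the rewrite author's own statement) =====
-- stated objective: alternative
-- what changed: Subtree sizes are computed without recursion or a memo cache: each node's depth is found by walking the parent chain, and one accumulation pass over the nodes sorted by decreasing depth pushes every node's completed size onto its parent; the scoring loop then just reads the sizes array.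
-- outside the precondition, e.g. on countHighestScoreNodes([2, 2, 2, 2, 2, 2, 2]): A returns 6, B does not finish within the time limit; on countHighestScoreNodes([1, 0]): A raises RecursionError, B does not finish within the time limit; on countHighestScoreNodes([5, -1]): A raises IndexError, B raises IndexError
import Mathlib
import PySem

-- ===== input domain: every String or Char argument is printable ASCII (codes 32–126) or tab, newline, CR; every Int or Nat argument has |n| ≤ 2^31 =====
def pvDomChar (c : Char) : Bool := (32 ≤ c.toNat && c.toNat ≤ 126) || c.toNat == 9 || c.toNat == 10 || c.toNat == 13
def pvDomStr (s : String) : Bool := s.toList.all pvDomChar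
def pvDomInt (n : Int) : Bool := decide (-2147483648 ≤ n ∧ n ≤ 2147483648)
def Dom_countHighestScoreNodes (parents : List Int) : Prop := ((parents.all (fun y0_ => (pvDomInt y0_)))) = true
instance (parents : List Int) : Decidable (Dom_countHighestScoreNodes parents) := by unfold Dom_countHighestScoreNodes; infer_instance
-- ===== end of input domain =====

-- B replaces A's recursive memoized subtree-size computation by a depth-sorted accumulation pass
-- (alternative decomposition, not claimed faster); scoring is unchanged.

-- ===== PORT A =====
-- children-building loop, identical line for line in Source A and Source B
def pvChildren (parents : List Int) : List (List Int) :=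
  (PySem.List.enumerate parents 0).foldl
    (fun ch ip => if ip.2 > -1 then ch.set ip.2.toNat (ch.getD ip.2.toNat [] ++ [ip.1]) else ch)
    (List.replicate parents.length [])

-- A's `def subtree(node)` with its cache threaded through; fuel (= size at the call sites)
-- only makes the recursion structural — under Pre_ it never runs out.
def subtreeA (children : List (List Int)) : Nat → Nat → List Int → List Int × Int
  | 0, _, cache => (cache, 0)
  | fuel+1, node, cache =>
    if cache.getD node (-1) = -1 then
      let r := (children.getD node []).foldl
        (fun acc c =>
          let r2 := subtreeA children fuel c.toNat acc.1
          (r2.1, acc.2 + r2.2)) (cache, (0 : Int))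
      let cache' := r.1.set node (1 + r.2)
      (cache', cache'.getD node (-1))
    else (cache, cache.getD node (-1))

-- body of A's scoring loop (state: cache, best, same)
def scoreStepA (children : List (List Int)) (size : Nat) (st : List Int × Int × Int) (node : Nat) :
    List Int × Int × Int :=
  let ch := children.getD node []
  let r1 := if ch.length ≥ 1 then subtreeA children size (ch.getD 0 0).toNat st.1 else (st.1, 0)
  let r2 := if ch.length = 2 then subtreeA children size (ch.getD 1 0).toNat r1.1 else (r1.1, 0)
  let above := (size : Int) - (1 + r1.2 + r2.2)
  let score := max above 1 * max r1.2 1 * max r2.2 1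
  let bs := if st.2.1 < score then (score, (0 : Int)) else st.2
  (r2.1, bs.1, if bs.1 = score then bs.2 + 1 else bs.2)

def countHighestScoreNodes (parents : List Int) : Int :=
  let size := parents.length
  let children := pvChildren parents
  let st := (List.range size).foldl (scoreStepA children size) (List.replicate size (-1), 0, 0)
  st.2.2

-- ===== PORT B =====
-- Source B's inner `while j > -1: d += 1; j = parents[j]` (fuel = size suffices under Pre_)
def depthLoopB (parents : List Int) : Nat → Int → Int → Int
  | 0, d, _ => d
  | fuel+1, d, j => if j > -1 then depthLoopB parents fuel (d + 1) (parents.getD j.toNat (-1)) else d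

def pvDepths (parents : List Int) : List Int :=
  (List.range parents.length).map (fun i => depthLoopB parents parents.length 0 (parents.getD i (-1)))

-- sorted(range(size), key=lambda i: depth[i], reverse=True)
def pvOrder (parents : List Int) : List Int :=
  PySem.List.sorted (PySem.List.pyRange 0 (parents.length : Int) 1)
    (fun i => PySem.List.pyGetD (pvDepths parents) i 0) true

-- body of Source B's accumulation loop: sizes[p] += sizes[node]
def accumStepB (parents : List Int) (sizes : List Int) (node : Int) : List Int :=
  let p := parents.getD node.toNat (-1)
  if p > -1 then sizes.set p.toNat (sizes.getD p.toNat 0 + sizes.getD node.toNat 0) else sizes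

def pvSizes (parents : List Int) : List Int :=
  (pvOrder parents).foldl (accumStepB parents) (List.replicate parents.length 1)

-- body of Source B's scoring loop (state: best, same)
def scoreStepB (children : List (List Int)) (sizes : List Int) (size : Nat) (bs : Int × Int)
    (node : Nat) : Int × Int :=
  let ch := children.getD node []
  let one := if ch.length ≥ 1 then sizes.getD (ch.getD 0 0).toNat 0 else 0
  let two := if ch.length = 2 then sizes.getD (ch.getD 1 0).toNat 0 else 0
  let above := (size : Int) - (1 + one + two)
  let score := max above 1 * max one 1 * max two 1
  let best := if bs.1 < score then score else bs.1
  let same := if bs.1 < score then 0 else bs.2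
  (best, if best = score then same + 1 else same)

def countHighestScoreNodes_alt (parents : List Int) : Int :=
  let size := parents.length
  let children := pvChildren parents
  let sizes := pvSizes parents
  let st := (List.range size).foldl (scoreStepB children sizes size) (0, 0)
  st.2

-- ===== PRECONDITION & SPEC =====
-- walking the parent chain from j escapes (parent ≤ -1) within the given fuel,
-- and every pointer passed on the way is in range
def pvChaseOK (parents : List Int) : Nat → Int → Bool
  | 0, _ => false
  | fuel+1, j =>
    if j > -1 then
      decide (j < (parents.length : Int)) && pvChaseOK parents fuel (parents.getD j.toNat (-1))
    else true

-- Pre_ excludes inputs whose parent pointers are out of range or form a cycle: there A raises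
-- IndexError or RecursionError — except that A happens to return when no cycle is ever reached by
-- the scoring loop's first-two-children subtree queries, an accident of its lazy memoization that
-- B's unconditional parent-chain walk cannot reproduce (it does not terminate there).
-- (pvChaseOK states the graph-shape property "every parent chain escapes within n+1 steps,
-- through in-range pointers"; it walks the input's parent pointers, not either port's algorithm.)
def Pre_countHighestScoreNodes (parents : List Int) : Prop :=
  ∀ i ∈ List.range parents.length, pvChaseOK parents (parents.length + 1) (i : Int) = true
instance (parents : List Int) : Decidable (Pre_countHighestScoreNodes parents) := by
  unfold Pre_countHighestScoreNodes; infer_instance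

def pvWitness_countHighestScoreNodes : List Int := [-1, 0, 0, 2]

def Spec_countHighestScoreNodes (parents : List Int) (out : Int) : Prop :=
  out = countHighestScoreNodes_alt parents
instance (parents : List Int) (out : Int) : Decidable (Spec_countHighestScoreNodes parents out) := by
  unfold Spec_countHighestScoreNodes; infer_instance

-- ===== CLAIM (what is proved, stated in full; the proofs are below) =====
def Claim_equal_countHighestScoreNodes : Prop :=
  ∀ (parents : List Int), Dom_countHighestScoreNodes parents →
    Pre_countHighestScoreNodes parents →
    Spec_countHighestScoreNodes parents (countHighestScoreNodes parents)

-- ===== LEMMAS AND PROOFS =====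

-- the parent chain from j (j itself first), as a list of node indices
def chainP (parents : List Int) : Nat → Int → List Nat
  | 0, _ => []
  | fuel+1, j => if j > -1 then j.toNat :: chainP parents fuel (parents.getD j.toNat (-1)) else []

-- depth of node i = number of proper ancestors
def depP (parents : List Int) (i : Nat) : Nat :=
  (chainP parents parents.length (parents.getD i (-1))).length

-- fuel sufficient to evaluate the subtree size at i (decreases by 1 from parent to child)
def mP (parents : List Int) (i : Nat) : Nat := parents.length + 1 - depP parents i

-- pure subtree-size recursion (the common spec both ports are proved against)
def szF (children : List (List Int)) : Nat → Nat → Int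
  | 0, _ => 0
  | fuel+1, node => 1 + ((children.getD node []).map (fun c => szF children fuel c.toNat)).sum

def szP (parents : List Int) (k : Nat) : Int := szF (pvChildren parents) (mP parents k) k

def kidsOf (parents : List Int) (j : Nat) : List Int := (pvChildren parents).getD j []

-- A's cache invariant
def ValidC (parents : List Int) (cache : List Int) : Prop :=
  cache.length = parents.length ∧
  ∀ k, k < parents.length → cache.getD k (-1) = -1 ∨ cache.getD k (-1) = szP parents k

-- ---- generic list helpers ----
lemma getD_set_self (l : List Int) (n : Nat) (a d : Int) (h : n < l.length) :
    (l.set n a).getD n d = a := by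
  simp [List.getD, h]

lemma getD_set_ne (l : List Int) (n m : Nat) (a d : Int) (h : m ≠ n) :
    (l.set n a).getD m d = l.getD m d := by
  simp [List.getD, List.getElem?_set_ne (by omega : n ≠ m)]

lemma getDL_set_self (l : List (List Int)) (n : Nat) (a : List Int) (h : n < l.length) :
    (l.set n a).getD n [] = a := by
  simp [List.getD, h]

lemma getDL_set_ne (l : List (List Int)) (n m : Nat) (a : List Int) (h : m ≠ n) :
    (l.set n a).getD m [] = l.getD m [] := by
  simp [List.getD, List.getElem?_set_ne (by omega : n ≠ m)]

lemma filter_mem_snoc_of_not_mem (ks P : List Int) (x : Int) (hx : x ∉ ks) :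
    ks.filter (fun c => decide (c ∈ P ++ [x])) = ks.filter (fun c => decide (c ∈ P)) := by
  apply List.filter_congr
  intro c hc
  simp only [List.mem_append, List.mem_singleton, decide_eq_decide]
  constructor
  · rintro (h | rfl)
    · exact h
    · exact absurd hc hx
  · exact Or.inl

lemma sum_filter_snoc (ks P : List Int) (x : Int) (f : Int → Int) (hnd : ks.Nodup)
    (hxk : x ∈ ks) (hxP : x ∉ P) :
    ((ks.filter (fun c => decide (c ∈ P ++ [x]))).map f).sum
      = ((ks.filter (fun c => decide (c ∈ P))).map f).sum + f x := by
  induction ks with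
  | nil => simp at hxk
  | cons a t ih =>
    by_cases hax : x = a
    · subst hax
      have hat : x ∉ t := (List.nodup_cons.mp hnd).1
      rw [List.filter_cons_of_pos (by simp), List.filter_cons_of_neg (by simpa using hxP),
        filter_mem_snoc_of_not_mem t P x hat]
      simp only [List.map_cons, List.sum_cons]
      ring
    · have hxt : x ∈ t := by
        rcases List.mem_cons.mp hxk with h | h
        · exact absurd h hax
        · exact h
      have ih' := ih (List.nodup_cons.mp hnd).2 hxt
      by_cases ha : a ∈ P
      · rw [List.filter_cons_of_pos (by simp [ha]), List.filter_cons_of_pos (by simpa using ha)]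
        simp only [List.map_cons, List.sum_cons, ih']
        ring
      · rw [List.filter_cons_of_neg (by simp [ha]; exact fun h => hax h.symm),
          List.filter_cons_of_neg (by simpa using ha)]
        exact ih'

-- ---- chain lemmas ----

lemma chain_stable (parents : List Int) :
    ∀ f f' j, pvChaseOK parents f j = true → f ≤ f' →
      chainP parents f' j = chainP parents f j := by
  intro f
  induction f with
  | zero => intro f' j h; simp [pvChaseOK] at h
  | succ a ih =>
    intro f' j h hle
    obtain ⟨b, rfl⟩ : ∃ b, f' = b + 1 := ⟨f' - 1, by omega⟩
    simp only [pvChaseOK] at h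
    simp only [chainP]
    by_cases hj : j > -1
    · simp only [if_pos hj] at h ⊢
      obtain ⟨h1, h2⟩ := Bool.and_eq_true_iff.mp h
      rw [ih b _ h2 (by omega)]
    · simp [if_neg hj]

lemma depthLoopB_eq (parents : List Int) :
    ∀ f f' j, pvChaseOK parents f j = true → f ≤ f' →
      ∀ d, depthLoopB parents f' d j = d + (chainP parents f j).length := by
  intro f
  induction f with
  | zero => intro f' j h; simp [pvChaseOK] at h
  | succ a ih =>
    intro f' j h hle d
    obtain ⟨b, rfl⟩ : ∃ b, f' = b + 1 := ⟨f' - 1, by omega⟩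
    simp only [pvChaseOK] at h
    simp only [chainP, depthLoopB]
    by_cases hj : j > -1
    · simp only [if_pos hj] at h ⊢
      obtain ⟨h1, h2⟩ := Bool.and_eq_true_iff.mp h
      rw [ih b _ h2 (by omega)]
      simp only [List.length_cons]
      push_cast
      ring
    · simp [if_neg hj]

lemma chain_length_le (parents : List Int) : ∀ f j, (chainP parents f j).length ≤ f := by
  intro f
  induction f with
  | zero => intro j; simp [chainP]
  | succ a ih =>
    intro j
    simp only [chainP]
    by_cases hj : j > -1
    · simp only [if_pos hj, List.length_cons]
      exact Nat.succ_le_succ (ih _)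
    · simp [if_neg hj]

lemma chase_step (parents : List Int) (f : Nat) (j : Int)
    (h : pvChaseOK parents (f+1) j = true) (hj : j > -1) :
    j.toNat < parents.length ∧ pvChaseOK parents f (parents.getD j.toNat (-1)) = true := by
  simp only [pvChaseOK, if_pos hj] at h
  obtain ⟨h1, h2⟩ := Bool.and_eq_true_iff.mp h
  refine ⟨?_, h2⟩
  have := of_decide_eq_true h1
  omega

lemma chaseOK_par (parents : List Int) (hpre : Pre_countHighestScoreNodes parents)
    (i : Nat) (hi : i < parents.length) :
    pvChaseOK parents parents.length (parents.getD i (-1)) = true := by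
  have h := hpre i (List.mem_range.mpr hi)
  have hj : (i : Int) > -1 := by omega
  have := (chase_step parents parents.length (i : Int) h hj).2
  simpa using this

lemma dep_le (parents : List Int) (i : Nat) : depP parents i ≤ parents.length := by
  exact chain_length_le parents _ _

lemma dep_succ (parents : List Int) (hpre : Pre_countHighestScoreNodes parents)
    (c node : Nat) (hc : c < parents.length) (hn : node < parents.length)
    (hp : parents.getD c (-1) = (node : Int)) :
    depP parents c = depP parents node + 1 := by
  obtain ⟨t, ht⟩ : ∃ t, parents.length = t + 1 := ⟨parents.length - 1, by omega⟩
  have hcn : pvChaseOK parents parents.length (parents.getD c (-1)) = true :=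
    chaseOK_par parents hpre c hc
  rw [hp] at hcn
  have hstep : pvChaseOK parents t (parents.getD node (-1)) = true := by
    rw [ht] at hcn
    have := (chase_step parents t (node : Int) hcn (by have := Int.natCast_nonneg node; omega)).2
    simpa using this
  have e1 : chainP parents (t+1) ((node : Int))
      = node :: chainP parents t (parents.getD node (-1)) := by
    simp [chainP]
    omega
  have e2 : chainP parents (t+1) (parents.getD node (-1))
      = chainP parents t (parents.getD node (-1)) :=
    chain_stable parents t (t+1) _ hstep (by omega)
  unfold depP
  rw [hp, ht, e1, e2, List.length_cons]

lemma par_lt (parents : List Int) (hpre : Pre_countHighestScoreNodes parents)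
    (i : Nat) (hi : i < parents.length) (h : parents.getD i (-1) > -1) :
    (parents.getD i (-1)).toNat < parents.length := by
  have hcn : pvChaseOK parents parents.length (parents.getD i (-1)) = true :=
    chaseOK_par parents hpre i hi
  obtain ⟨t, ht⟩ : ∃ t, parents.length = t + 1 := ⟨parents.length - 1, by omega⟩
  rw [ht] at hcn
  have := (chase_step parents t _ hcn h).1
  omega

lemma buildAux (l : List Int) : ∀ (s : Int) (ch : List (List Int)) (j : Nat), j < ch.length →
    ((PySem.List.enumerate l s).foldl
      (fun ch ip => if ip.2 > -1 then ch.set ip.2.toNat (ch.getD ip.2.toNat [] ++ [ip.1]) else ch)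
      ch).getD j []
    = ch.getD j [] ++ ((PySem.List.enumerate l s).filter (fun ip => ip.2 == (j : Int))).map (·.1) := by
  induction l with
  | nil => intro s ch j hj; simp [PySem.List.enumerate_nil]
  | cons p l ih =>
    intro s ch j hj
    rw [PySem.List.enumerate_cons, List.foldl_cons, List.filter_cons]
    by_cases hb : p > -1
    · simp only [if_pos hb]
      by_cases hpj : p = (j : Int)
      · have hptn : p.toNat = j := by omega
        have hfilter : ((s, p).2 == (j : Int)) = true := by simp [hpj]
        rw [hfilter]
        rw [ih _ _ j (by simpa using hj)]
        rw [show (ch.set p.toNat (ch.getD p.toNat [] ++ [(s, p).1])).getD j []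
            = ch.getD j [] ++ [s] by rw [← hptn] at hj ⊢; exact getDL_set_self _ _ _ (by simpa using hj)]
        simp [List.append_assoc]
      · have hptn : p.toNat ≠ j := by omega
        have hfilter : ((s, p).2 == (j : Int)) = false := by
          simp only [beq_eq_false_iff_ne, ne_eq]
          exact hpj
        rw [hfilter]
        rw [ih _ _ j (by simpa using hj)]
        rw [getDL_set_ne _ _ _ _ (fun h => hptn h.symm)]
        simp
  -- the ¬(p > -1) branch
    · simp only [if_neg hb]
      have hfilter : ((s, p).2 == (j : Int)) = false := by
        simp only [beq_eq_false_iff_ne, ne_eq]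
        omega
      rw [hfilter]
      simp only [Bool.false_eq_true, if_false]
      exact ih _ _ j hj


-- ---- children lemmas ----

lemma kids_eq (parents : List Int) (j : Nat) (hj : j < parents.length) :
    kidsOf parents j
      = ((PySem.List.enumerate parents 0).filter (fun ip => ip.2 == (j : Int))).map (·.1) := by
  unfold kidsOf pvChildren
  rw [buildAux parents 0 _ j (by simpa using hj)]
  simp

lemma mem_kids (parents : List Int) (j : Nat) (hj : j < parents.length) (c : Int) :
    c ∈ kidsOf parents j ↔ ∃ k, k < parents.length ∧ c = (k : Int) ∧
      parents.getD k (-1) = (j : Int) := by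
  rw [kids_eq parents j hj]
  simp only [List.mem_map, List.mem_filter, PySem.List.mem_enumerate_iff]
  constructor
  · rintro ⟨ip, ⟨⟨k, hk, rfl⟩, hip2⟩, rfl⟩
    refine ⟨k, hk, by simp, ?_⟩
    have := beq_iff_eq.mp hip2
    simp only at this
    rw [List.getD, List.getElem?_eq_getElem hk]
    simpa using this
  · rintro ⟨k, hk, rfl, hpar⟩
    refine ⟨(0 + (k : Int), parents[k]), ⟨⟨k, hk, rfl⟩, ?_⟩, by simp⟩
    rw [List.getD, List.getElem?_eq_getElem hk] at hpar
    simpa using hpar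

lemma kids_nodup (parents : List Int) (j : Nat) (hj : j < parents.length) :
    (kidsOf parents j).Nodup := by
  rw [kids_eq parents j hj]
  have h1 := PySem.List.pairwise_lt_enumerate (xs := parents) (s := 0)
  have h2 := h1.filter (fun ip => ip.2 == (j : Int))
  rw [List.Nodup, List.pairwise_map]
  exact h2.imp (fun h => ne_of_lt h)

lemma kids_m (parents : List Int) (hpre : Pre_countHighestScoreNodes parents)
    (node : Nat) (hn : node < parents.length) (c : Int) (hc : c ∈ kidsOf parents node) :
    0 ≤ c ∧ c.toNat < parents.length ∧ depP parents c.toNat = depP parents node + 1 := by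
  obtain ⟨k, hk, rfl, hpar⟩ := (mem_kids parents node hn c).mp hc
  refine ⟨by positivity, by simpa using hk, ?_⟩
  simp only [Int.toNat_natCast]
  exact dep_succ parents hpre k node hk hn hpar

-- ---- size lemmas ----

lemma sz_rec (parents : List Int) (hpre : Pre_countHighestScoreNodes parents)
    (node : Nat) (hn : node < parents.length) :
    szP parents node
      = 1 + ((kidsOf parents node).map (fun c => szP parents c.toNat)).sum := by
  have hd := dep_le parents node
  obtain ⟨t, htm⟩ : ∃ t, mP parents node = t + 1 := ⟨mP parents node - 1, by unfold mP; omega⟩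
  unfold szP
  rw [htm]
  simp only [szF]
  congr 1
  refine congrArg List.sum (List.map_congr_left ?_)
  intro c hc
  obtain ⟨hc0, hcn, hcd⟩ := kids_m parents hpre node hn c hc
  have : t = mP parents c.toNat := by
    unfold mP at htm ⊢
    rw [hcd]
    omega
  rw [this]

-- ---- A-side: memoization is correct ----
lemma subtree_fold (parents : List Int) (fuel : Nat)
    (hM : ∀ node cache, node < parents.length → mP parents node ≤ fuel → ValidC parents cache →
      (subtreeA (pvChildren parents) fuel node cache).2 = szP parents node ∧
      ValidC parents (subtreeA (pvChildren parents) fuel node cache).1) :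
    ∀ (l : List Int) (cache : List Int) (acc : Int),
      (∀ c ∈ l, c.toNat < parents.length ∧ mP parents c.toNat ≤ fuel) →
      ValidC parents cache →
      (l.foldl (fun acc c =>
          let r2 := subtreeA (pvChildren parents) fuel c.toNat acc.1
          (r2.1, acc.2 + r2.2)) (cache, acc)).2
        = acc + (l.map (fun c => szP parents c.toNat)).sum ∧
      ValidC parents (l.foldl (fun acc c =>
          let r2 := subtreeA (pvChildren parents) fuel c.toNat acc.1
          (r2.1, acc.2 + r2.2)) (cache, acc)).1 := by
  intro l
  induction l with
  | nil =>
    intro cache acc _ hv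
    exact ⟨by simp, hv⟩
  | cons c l ih =>
    intro cache acc hl hv
    obtain ⟨hcn, hcf⟩ := hl c List.mem_cons_self
    obtain ⟨h2, hV⟩ := hM c.toNat cache hcn hcf hv
    simp only [List.foldl_cons]
    rw [h2]
    obtain ⟨hA, hB⟩ := ih ((subtreeA (pvChildren parents) fuel c.toNat cache).1)
      (acc + szP parents c.toNat) (fun d hd => hl d (List.mem_cons_of_mem c hd)) hV
    refine ⟨?_, hB⟩
    rw [hA]
    simp only [List.map_cons, List.sum_cons]
    ring

lemma subtree_correct (parents : List Int) (hpre : Pre_countHighestScoreNodes parents) :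
    ∀ fuel node cache, node < parents.length → mP parents node ≤ fuel →
      ValidC parents cache →
      (subtreeA (pvChildren parents) fuel node cache).2 = szP parents node ∧
      ValidC parents (subtreeA (pvChildren parents) fuel node cache).1 := by
  intro fuel
  induction fuel with
  | zero =>
    intro node cache hn hf _
    have := dep_le parents node
    unfold mP at hf
    omega
  | succ a ih =>
    intro node cache hn hf hv
    by_cases h : cache.getD node (-1) = -1
    · have hargs : ∀ c ∈ (pvChildren parents).getD node [],
          c.toNat < parents.length ∧ mP parents c.toNat ≤ a := by
        intro c hc
        obtain ⟨hc0, hcn, hcd⟩ := kids_m parents hpre node hn c hc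
        have := dep_le parents node
        refine ⟨hcn, ?_⟩
        unfold mP at hf ⊢
        rw [hcd]
        omega
      obtain ⟨hA, hB⟩ := subtree_fold parents a (fun nd ca h1 h2 h3 => ih nd ca h1 h2 h3)
        ((pvChildren parents).getD node []) cache 0 hargs hv
      have hlen : ((pvChildren parents).getD node []).foldl (fun acc c =>
          let r2 := subtreeA (pvChildren parents) a c.toNat acc.1
          (r2.1, acc.2 + r2.2)) (cache, (0 : Int)) |>.1.length = parents.length := hB.1
      have hval : (1 : Int) + (((pvChildren parents).getD node []).foldl (fun acc c =>
          let r2 := subtreeA (pvChildren parents) a c.toNat acc.1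
          (r2.1, acc.2 + r2.2)) (cache, (0 : Int))).2 = szP parents node := by
        rw [hA, sz_rec parents hpre node hn]
        simp [kidsOf]
      simp only [subtreeA, if_pos h]
      rw [getD_set_self _ _ _ _ (by rw [hlen]; exact hn)]
      refine ⟨hval, ?_⟩
      refine ⟨by simpa using hlen, ?_⟩
      intro k hk
      by_cases hkn : k = node
      · subst hkn
        rw [getD_set_self _ _ _ _ (by rw [hlen]; exact hk)]
        exact Or.inr hval
      · rw [getD_set_ne _ _ _ _ _ hkn]
        exact hB.2 k hk
    · simp only [subtreeA, if_neg h]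
      exact ⟨(hv.2 node hn).resolve_left h, hv⟩

-- ---- B-side: the accumulation pass computes the same sizes ----
lemma sizes_inv (parents : List Int) (hpre : Pre_countHighestScoreNodes parents) :
    ∀ (L P sizes : List Int),
      (P ++ L).Perm (PySem.List.pyRange 0 (parents.length : Int) 1) →
      L.Pairwise (fun a b => depP parents b.toNat ≤ depP parents a.toNat) →
      sizes.length = parents.length →
      (∀ j, j < parents.length → sizes.getD j 0
        = 1 + (((kidsOf parents j).filter (fun c => decide (c ∈ P))).map
            (fun c => szP parents c.toNat)).sum) →
      ∀ j, j < parents.length → (L.foldl (accumStepB parents) sizes).getD j 0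
        = 1 + (((kidsOf parents j).filter (fun c => decide (c ∈ P ++ L))).map
            (fun c => szP parents c.toNat)).sum := by
  intro L
  induction L with
  | nil =>
    intro P sizes _ _ _ hinv j hj
    simpa using hinv j hj
  | cons node L ih =>
    intro P sizes hperm hpw hlen hinv j hj
    have hnd : (P ++ node :: L).Nodup :=
      (hperm.nodup_iff).mpr (PySem.List.nodup_pyRange_one 0 (parents.length : Int))
    have hmem : node ∈ PySem.List.pyRange 0 (parents.length : Int) 1 :=
      hperm.subset (by simp)
    obtain ⟨hn0, hnub⟩ := (PySem.List.mem_pyRange_one).mp hmem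
    have hnlt : node.toNat < parents.length := by omega
    have hpwc := List.pairwise_cons.mp hpw
    have hkids_sub : ∀ c ∈ kidsOf parents node.toNat, c ∈ P := by
      intro c hc
      obtain ⟨hc0, hcn, hcd⟩ := kids_m parents hpre node.toNat hnlt c hc
      have hcmem : c ∈ P ++ node :: L := (hperm.mem_iff).mpr
        ((PySem.List.mem_pyRange_one).mpr ⟨hc0, by omega⟩)
      rcases List.mem_append.mp hcmem with h | h
      · exact h
      · rcases List.mem_cons.mp h with rfl | h
        · omega
        · have := hpwc.1 c h
          omega
    have hnodeP : node ∉ P := by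
      intro hmemP
      exact (List.disjoint_of_nodup_append hnd) hmemP List.mem_cons_self
    have hsz_node : sizes.getD node.toNat 0 = szP parents node.toNat := by
      rw [hinv node.toNat hnlt,
        List.filter_eq_self.mpr (fun c hc => decide_eq_true (hkids_sub c hc)),
        ← sz_rec parents hpre node.toNat hnlt]
    have hassoc : (P ++ [node]) ++ L = P ++ node :: L := by simp
    simp only [List.foldl_cons]
    by_cases hp : parents.getD node.toNat (-1) > -1
    · have hplt : (parents.getD node.toNat (-1)).toNat < parents.length :=
        par_lt parents hpre node.toNat hnlt hp
      have hstep : accumStepB parents sizes node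
          = sizes.set (parents.getD node.toNat (-1)).toNat
              (sizes.getD (parents.getD node.toNat (-1)).toNat 0 + sizes.getD node.toNat 0) := by
        unfold accumStepB
        rw [if_pos hp]
      have hinv' : ∀ j', j' < parents.length → (accumStepB parents sizes node).getD j' 0
          = 1 + (((kidsOf parents j').filter (fun c => decide (c ∈ P ++ [node]))).map
              (fun c => szP parents c.toNat)).sum := by
        intro j' hj'
        rw [hstep]
        by_cases hjp : j' = (parents.getD node.toNat (-1)).toNat
        · rw [hjp]
          rw [getD_set_self _ _ _ _ (by rw [hlen]; exact hplt)]
          have hnode_kid : node ∈ kidsOf parents (parents.getD node.toNat (-1)).toNat := by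
            refine (mem_kids parents _ hplt node).mpr ⟨node.toNat, hnlt, by omega, ?_⟩
            omega
          rw [sum_filter_snoc _ P node _ (kids_nodup parents _ hplt) hnode_kid hnodeP,
            hinv _ hplt, hsz_node]
          ring
        · rw [getD_set_ne _ _ _ _ _ hjp]
          have hnode_nk : node ∉ kidsOf parents j' := by
            intro hmemk
            obtain ⟨k, hk, hck, hpark⟩ := (mem_kids parents j' hj' node).mp hmemk
            have : node.toNat = k := by omega
            subst this
            omega
          rw [filter_mem_snoc_of_not_mem _ P node hnode_nk]
          exact hinv j' hj'
      have := ih (P ++ [node]) (accumStepB parents sizes node)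
        (by rw [hassoc]; exact hperm)
        hpwc.2
        (by rw [hstep]; simpa using hlen)
        hinv' j hj
      rw [hassoc] at this
      exact this
    · have hstep : accumStepB parents sizes node = sizes := by
        unfold accumStepB
        rw [if_neg hp]
      have hinv' : ∀ j', j' < parents.length → (accumStepB parents sizes node).getD j' 0
          = 1 + (((kidsOf parents j').filter (fun c => decide (c ∈ P ++ [node]))).map
              (fun c => szP parents c.toNat)).sum := by
        intro j' hj'
        rw [hstep]
        have hnode_nk : node ∉ kidsOf parents j' := by
          intro hmemk
          obtain ⟨k, hk, hck, hpark⟩ := (mem_kids parents j' hj' node).mp hmemk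
          have : node.toNat = k := by omega
          subst this
          omega
        rw [filter_mem_snoc_of_not_mem _ P node hnode_nk]
        exact hinv j' hj'
      have := ih (P ++ [node]) (accumStepB parents sizes node)
        (by rw [hassoc]; exact hperm)
        hpwc.2
        (by rw [hstep]; exact hlen)
        hinv' j hj
      rw [hassoc] at this
      exact this

lemma depths_key (parents : List Int) (hpre : Pre_countHighestScoreNodes parents)
    (x : Int) (hx0 : 0 ≤ x) (hxn : x.toNat < parents.length) :
    PySem.List.pyGetD (pvDepths parents) x 0 = (depP parents x.toNat : Int) := by
  have hx : x = ((x.toNat : Nat) : Int) := by omega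
  rw [hx, PySem.List.pyGetD_natCast]
  unfold pvDepths
  rw [PySem.List.getD_map_range _ _ _ _ hxn]
  rw [depthLoopB_eq parents parents.length parents.length _
    (chaseOK_par parents hpre x.toNat hxn) le_rfl 0]
  have hmx : (max x 0).toNat = x.toNat := by omega
  simp [depP, hmx]

lemma pvSizes_eq (parents : List Int) (hpre : Pre_countHighestScoreNodes parents)
    (j : Nat) (hj : j < parents.length) :
    (pvSizes parents).getD j 0 = szP parents j := by
  have hperm : (([] : List Int) ++ pvOrder parents).Perm
      (PySem.List.pyRange 0 (parents.length : Int) 1) := by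
    simpa [pvOrder] using
      PySem.List.sorted_perm (PySem.List.pyRange 0 (parents.length : Int) 1)
        (fun i => PySem.List.pyGetD (pvDepths parents) i 0) true
  have hpw : (pvOrder parents).Pairwise
      (fun a b => depP parents b.toNat ≤ depP parents a.toNat) := by
    have h := PySem.List.sorted_pairwise_rev (PySem.List.pyRange 0 (parents.length : Int) 1)
      (fun i => PySem.List.pyGetD (pvDepths parents) i 0)
    refine h.imp_of_mem ?_
    intro a b ha hb hk
    have ha' := (PySem.List.mem_pyRange_one).mp ((PySem.List.mem_sorted _ _ _ a).mp ha)
    have hb' := (PySem.List.mem_pyRange_one).mp ((PySem.List.mem_sorted _ _ _ b).mp hb)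
    rw [depths_key parents hpre a ha'.1 (by omega),
      depths_key parents hpre b hb'.1 (by omega)] at hk
    exact_mod_cast hk
  have hbase : ∀ j', j' < parents.length → (List.replicate parents.length (1 : Int)).getD j' 0
      = 1 + (((kidsOf parents j').filter
          (fun c => decide (c ∈ ([] : List Int)))).map (fun c => szP parents c.toNat)).sum := by
    intro j' hj'
    simp [hj']
  have h := sizes_inv parents hpre (pvOrder parents) [] (List.replicate parents.length 1)
    hperm hpw (by simp) hbase j hj
  unfold pvSizes
  rw [h]
  have hall : (kidsOf parents j).filter (fun c => decide (c ∈ ([] : List Int) ++ pvOrder parents))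
      = kidsOf parents j := by
    apply List.filter_eq_self.mpr
    intro c hc
    obtain ⟨hc0, hcn, -⟩ := kids_m parents hpre j hj c hc
    apply decide_eq_true
    simp only [List.nil_append]
    rw [pvOrder, PySem.List.mem_sorted]
    exact (PySem.List.mem_pyRange_one).mpr ⟨hc0, by omega⟩
  rw [hall, ← sz_rec parents hpre j hj]

-- ---- scoring loops agree ----
lemma update_pair (best same score : Int) :
    ((if best < score then (score, (0 : Int)) else (best, same)).1,
     if (if best < score then (score, (0 : Int)) else (best, same)).1 = score
     then (if best < score then (score, (0 : Int)) else (best, same)).2 + 1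
     else (if best < score then (score, (0 : Int)) else (best, same)).2)
    = (if best < score then score else best,
       if (if best < score then score else best) = score
       then (if best < score then (0 : Int) else same) + 1
       else (if best < score then (0 : Int) else same)) := by
  by_cases h : best < score <;> simp [h]

lemma score_step (parents : List Int) (hpre : Pre_countHighestScoreNodes parents)
    (hs : ∀ j, j < parents.length → (pvSizes parents).getD j 0 = szP parents j)
    (node : Nat) (hn : node < parents.length) (cache : List Int) (best same : Int)
    (hv : ValidC parents cache) :
    (scoreStepA (pvChildren parents) parents.length (cache, best, same) node).2
      = scoreStepB (pvChildren parents) (pvSizes parents) parents.length (best, same) node ∧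
    ValidC parents (scoreStepA (pvChildren parents) parents.length (cache, best, same) node).1 := by
  have hdl := dep_le parents node
  by_cases hl1 : ((pvChildren parents).getD node []).length ≥ 1
  · have hc0 : ((pvChildren parents).getD node []).getD 0 0 ∈ kidsOf parents node := by
      rw [List.getD_eq_getElem _ _ (by omega)]
      exact List.getElem_mem _
    obtain ⟨hc00, hc0n, hc0d⟩ := kids_m parents hpre node hn _ hc0
    obtain ⟨e1, v1⟩ := subtree_correct parents hpre parents.length
      (((pvChildren parents).getD node []).getD 0 0).toNat cache hc0n
      (by unfold mP; rw [hc0d]; omega) hv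
    by_cases hl2 : ((pvChildren parents).getD node []).length = 2
    · have hc1 : ((pvChildren parents).getD node []).getD 1 0 ∈ kidsOf parents node := by
        rw [List.getD_eq_getElem _ _ (by omega)]
        exact List.getElem_mem _
      obtain ⟨hc10, hc1n, hc1d⟩ := kids_m parents hpre node hn _ hc1
      obtain ⟨e2, v2⟩ := subtree_correct parents hpre parents.length
        (((pvChildren parents).getD node []).getD 1 0).toNat
        (subtreeA (pvChildren parents) parents.length
          (((pvChildren parents).getD node []).getD 0 0).toNat cache).1 hc1n
        (by unfold mP; rw [hc1d]; omega) v1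
      unfold scoreStepA scoreStepB
      simp only [if_pos hl1, if_pos hl2, e1, e2, hs _ hc0n, hs _ hc1n]
      exact ⟨update_pair best same _, v2⟩
    · unfold scoreStepA scoreStepB
      simp only [if_pos hl1, if_neg hl2, e1, hs _ hc0n]
      exact ⟨update_pair best same _, v1⟩
  · have hl2 : ¬ ((pvChildren parents).getD node []).length = 2 := by omega
    unfold scoreStepA scoreStepB
    simp only [if_neg hl1, if_neg hl2]
    exact ⟨update_pair best same _, hv⟩

lemma scoring_eq (parents : List Int) (hpre : Pre_countHighestScoreNodes parents)
    (hs : ∀ j, j < parents.length → (pvSizes parents).getD j 0 = szP parents j) :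
    ∀ (l : List Nat) cache best same, ValidC parents cache → (∀ x ∈ l, x < parents.length) →
      (l.foldl (scoreStepA (pvChildren parents) parents.length) (cache, best, same)).2
        = l.foldl (scoreStepB (pvChildren parents) (pvSizes parents) parents.length)
            (best, same) := by
  intro l
  induction l with
  | nil => intro cache best same _ _; rfl
  | cons node l ih =>
    intro cache best same hv hl
    have hn : node < parents.length := hl node List.mem_cons_self
    obtain ⟨h1, h2⟩ := score_step parents hpre hs node hn cache best same hv
    simp only [List.foldl_cons]
    have hsplit : scoreStepA (pvChildren parents) parents.length (cache, best, same) node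
        = ((scoreStepA (pvChildren parents) parents.length (cache, best, same) node).1,
           scoreStepB (pvChildren parents) (pvSizes parents) parents.length (best, same) node) := by
      rw [← h1]
    rw [hsplit]
    have hB : scoreStepB (pvChildren parents) (pvSizes parents) parents.length (best, same) node
        = ((scoreStepB (pvChildren parents) (pvSizes parents) parents.length (best, same) node).1,
           (scoreStepB (pvChildren parents) (pvSizes parents) parents.length (best, same) node).2) := rfl
    rw [hB]
    exact ih _ _ _ h2 (fun x hx => hl x (List.mem_cons_of_mem node hx))

-- ===== VERDICT (by name: the statement is the Claim_ definition above) =====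
theorem countHighestScoreNodes_spec : Claim_equal_countHighestScoreNodes := by
  intro parents _hdom hpre
  unfold Spec_countHighestScoreNodes countHighestScoreNodes countHighestScoreNodes_alt
  have h := scoring_eq parents hpre (pvSizes_eq parents hpre) (List.range parents.length)
    (List.replicate parents.length (-1)) 0 0
    ⟨by simp, by intro k hk; left; simp⟩
    (by intro x hx; exact List.mem_range.mp hx)
  simpa using congrArg Prod.snd h
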